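/-
  THE LANGUAGE jsmn ACCEPTS, PART 3: THE TOKEN MODE OF THE DEFAULT BUILD, EXACTLY

  With a token array the default build (not strict, no parent links) checks ONE thing more than the counting mode: the brackets.
  `{` / `[` open a container; `}` / `]` must close the INNERMOST OPEN container, which must be of its own kind (else -2); at the end
  of the text no container may be open (else -3). Strings, primitives, colons and commas play no part in it: `brackets` below ignores them.

  `token_mode_default`: for every text shorter than 2^31 bytes and every token array with room for the tokens the lexer finds,
      jsmn_init; jsmn_parse = tokenResult (lex false .top js)
  where `tokenResult` runs `brackets` over the items and then looks at how the text ended. So the default build ACCEPTS a text exactly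
  when the lexer of Json/Jsmn/AcceptLang.lean reaches the end of the text and the brackets among the items are balanced
  (`token_mode_default_accepts`), and it then answers the number of tokens.

  WHAT OF RFC 8259 IS NOT ENFORCED (an example of each is in Json/Jsmn/AcceptTable.lean): everything about numbers and literals (see the
  lexer); commas between elements (missing, doubled, leading, trailing: all accepted); colons between key and value (missing, doubled,
  in arrays, at top level: all accepted); that a key is a string, that a key has exactly one value; that there is exactly one value at
  top level (none, or several, are accepted); control characters in strings.
-/
import Json.Jsmn.AcceptLang
import Json.Jsmn.Lemmas
set_option linter.unusedSimpArgs false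

namespace Jsmn.AcceptLang
open Jsmn

/-- The two kinds of container. -/
inductive Kind where
  | obj | arr
deriving DecidableEq, Repr

/-- jsmn's type number: JSMN_OBJECT = 1, JSMN_ARRAY = 2. -/
def Kind.type : Kind → Nat
  | .obj => JSMN_OBJECT
  | .arr => JSMN_ARRAY

/-- **The bracket check.** `brackets st items`: run over the items with the stack `st` of open containers (innermost first);
`none`: a closing bracket with no container open, or with the innermost open container of the other kind; else the stack at the end. -/
def brackets : List Kind → List Item → Option (List Kind)
  | st, [] => some st
  | st, .objOpen :: is => brackets (.obj :: st) is
  | st, .arrOpen :: is => brackets (.arr :: st) is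
  | [], .objClose :: _ => none
  | k :: st, .objClose :: is => if k = .obj then brackets st is else none
  | [], .arrClose :: _ => none
  | k :: st, .arrClose :: is => if k = .arr then brackets st is else none
  | st, .colon :: is => brackets st is
  | st, .comma :: is => brackets st is
  | st, .str :: is => brackets st is
  | st, .prim :: is => brackets st is

/-- What the token mode of the default build answers when `st` is the stack of open containers, `cnt` tokens have been made and the rest
of the text lexes to `r`. -/
def resultFrom (st : List Kind) (cnt : Int) (r : List Item × Ending) : Int :=
  match brackets st r.1 with
  | none => JSMN_ERROR_INVAL
  | some st' =>
    match r.2 with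
    | .inval => JSMN_ERROR_INVAL
    | .part => JSMN_ERROR_PART
    | .eof => if st' = [] then cnt + tokCount r.1 else JSMN_ERROR_PART

/-- **What the token mode of the default build answers** on a text that lexes to `r`. -/
def tokenResult (r : List Item × Ending) : Int := resultFrom [] 0 r

example : tokenResult (lex false .top (ascii "{a:1 [,,] x}")) = 5 := by decide
example : tokenResult (lex false .top (ascii "[1}")) = -2 := by decide
example : tokenResult (lex false .top (ascii "[[1]")) = -3 := by decide
example : tokenResult (lex false .top (ascii "]\"")) = -2 := by decide

/-! ### The open tokens of the array are the stack -/

/-- The types of the open tokens below index `k`, highest index first. -/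
def opens (ts : Tokens) : Nat → List Nat
  | 0 => []
  | k + 1 => if (ts.getD k default).isOpen then (ts.getD k default).type :: opens ts k else opens ts k

/-- `opens` looks only at `type`, `start`, `end` of the tokens below `k`. -/
theorem opens_congr {ts ts' : Tokens} {k : Nat}
    (h : ∀ i, i < k → (ts'.getD i default).isOpen = (ts.getD i default).isOpen ∧ (ts'.getD i default).type = (ts.getD i default).type) :
    opens ts' k = opens ts k := by
  induction k with
  | zero => rfl
  | succ k ih =>
    have := h k (by omega)
    simp only [opens, this.1, this.2]
    rw [ih (fun i hi => h i (by omega))]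

theorem opens_of_scanOpen_none {ts : Tokens} {k : Nat} (h : scanOpen ts k = none) : opens ts k = [] := by
  induction k with
  | zero => rfl
  | succ k ih =>
    simp only [scanOpen] at h
    split at h
    · cases h
    · rename_i ho; simp only [opens, ho]; exact ih h

theorem opens_of_scanOpen_some {ts : Tokens} {k j : Nat} (h : scanOpen ts k = some j) :
    opens ts k = (ts.getD j default).type :: opens ts j := by
  induction k with
  | zero => simp [scanOpen] at h
  | succ k ih =>
    simp only [scanOpen] at h
    split at h
    · rename_i ho
      have : k = j := by simpa using h
      subst this; rw [opens, if_pos ho]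
    · rename_i ho; simp only [opens, ho]; exact ih h

theorem scanOpen_none_of_opens {ts : Tokens} {k : Nat} (h : opens ts k = []) : scanOpen ts k = none := by
  cases hs : scanOpen ts k with
  | none => rfl
  | some j => rw [opens_of_scanOpen_some hs] at h; cases h


/-- What the bracket check sees of a token: its type, start and end (not its size, not its parent link). -/
def shape (t : Token) : Nat × Int × Int := (t.type, t.start, t.«end»)

theorem isOpen_of_shape {t t' : Token} (h : shape t' = shape t) : t'.isOpen = t.isOpen ∧ t'.type = t.type := by
  simp only [shape, Prod.mk.injEq] at h
  simp [Token.isOpen, h]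

/-- `tokens[i].size++` (or any change of `size` only) is invisible to the bracket check. -/
theorem shape_tokUpd_size (ts : Tokens) (i : Int) (g : Token → Int) (j : Nat) :
    shape ((tokUpd ts i fun t => { t with size := g t }).getD j default) = shape (ts.getD j default) := by
  unfold tokUpd
  split
  · rfl
  · rename_i h
    rw [getD_set, tokAt_nonneg (by omega)]
    split
    · rename_i h2; rw [h2.1]; rfl
    · rfl

/-- A token array with the same shapes below `k` has the same open tokens below `k`. -/
theorem opens_of_shape {ts ts' : Tokens} {k : Nat} (h : ∀ i, i < k → shape (ts'.getD i default) = shape (ts.getD i default)) :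
    opens ts' k = opens ts k := opens_congr fun i hi => isOpen_of_shape (h i hi)

/-- One more token, not open (a string or a primitive): the open tokens are the same. -/
theorem opens_add_closed {ts ts' : Tokens} {tn : Nat} (h : ∀ i, i < tn → shape (ts'.getD i default) = shape (ts.getD i default))
    (hc : (ts'.getD tn default).isOpen = false) : opens ts' (tn + 1) = opens ts tn := by
  rw [opens, if_neg (by rw [hc]; exact Bool.false_ne_true), opens_of_shape h]

/-- One more token, open (an object or array just begun). -/
theorem opens_add_open {ts ts' : Tokens} {tn : Nat} (h : ∀ i, i < tn → shape (ts'.getD i default) = shape (ts.getD i default))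
    (hc : (ts'.getD tn default).isOpen = true) : opens ts' (tn + 1) = (ts'.getD tn default).type :: opens ts tn := by
  rw [opens, if_pos hc, opens_of_shape h]

/-- `jsmn_alloc_token` when there is room. -/
theorem allocToken_default {p : Parser} {ts : Tokens} {n : Nat} (hroom : p.toknext < n) (h31 : p.toknext < 2147483648) :
    allocToken .default p ts n = some (p.toknext, { p with toknext := p.toknext + 1 },
      ts.set p.toknext { ts.getD p.toknext default with start := -1, «end» := -1, size := 0 }) := by
  have hu : u32 ((p.toknext : Int) + 1) = p.toknext + 1 := u32_succ (by omega)
  simp [allocToken, Nat.not_le.mpr hroom, hu, Config.default]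


/-- `jsmn_alloc_token` then `jsmn_fill_token` on token `tn`. -/
def fillAt (ts : Tokens) (tn : Nat) (type : Nat) (a b : Int) : Tokens :=
  (ts.set tn { ts.getD tn default with start := -1, «end» := -1, size := 0 }).set tn
    (fillToken ((ts.set tn { ts.getD tn default with start := -1, «end» := -1, size := 0 }).getD tn default) type a b)

/-- A string or primitive token is made (allocated, filled, its superior's size bumped): the array keeps its length and its open tokens. -/
theorem opens_after_fill {ts : Tokens} {tn : Nat} (p : Parser) (type : Nat) (a b : Int) (hlen : tn < ts.length) (hb : b ≠ -1) :
    ∃ ts', bumpSuper p (some (fillAt ts tn type a b)) = some ts' ∧ ts'.length = ts.length ∧ opens ts' (tn + 1) = opens ts tn := by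
  generalize hts2 : fillAt ts tn type a b = ts2
  have hl2 : ts2.length = ts.length := by rw [← hts2]; simp [fillAt]
  have hlow : ∀ i, i < tn → ts2.getD i default = ts.getD i default := by
    intro i hi; rw [← hts2, fillAt, getD_set_ne _ (by omega), getD_set_ne _ (by omega)]
  have htn : (ts2.getD tn default).isOpen = false := by
    rw [← hts2, fillAt, getD_set_eq _ (by simpa using hlen)]
    simp [fillToken, Token.isOpen, hb]
  have key : ∀ ts', (∀ j, shape (ts'.getD j default) = shape (ts2.getD j default)) → opens ts' (tn + 1) = opens ts tn := by
    intro ts' hsh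
    apply opens_add_closed
    · intro i hi; rw [hsh, hlow i hi]
    · rw [(isOpen_of_shape (hsh tn)).1, htn]
  simp only [bumpSuper]
  split
  · exact ⟨_, rfl, by rw [length_tokUpd, hl2], key _ (fun j => shape_tokUpd_size ts2 _ _ j)⟩
  · exact ⟨_, rfl, hl2, key _ (fun j => rfl)⟩

/-- jsmn_parse_string of the default build when the closing quote is found at `q` and there is room. -/
theorem parseString_quote_default {js : List UInt8} {fuel pos tn n q : Nat} {sup : Int} {ts : Tokens}
    (hr : strScan js fuel (pos + 1) = some (.quote q)) (hpos : pos + 1 < 4294967296) (hroom : tn < n) (h31 : tn < 2147483648) :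
    parseString .default js fuel ⟨pos, tn, sup⟩ (some ts) n =
      some (0, ⟨q, tn + 1, sup⟩, some (fillAt ts tn JSMN_STRING (i32 (i32 pos + 1)) (i32 q))) := by
  have ha := allocToken_default (p := ⟨q, tn, sup⟩) (ts := ts) (n := n) hroom h31
  have hpl : Config.default.parentLinks = false := rfl
  simp only [parseString, u32_succ hpos, hr, ha, hpl, Bool.false_eq_true, if_false]
  rfl

/-- jsmn_parse_primitive of the default build when the primitive ends at `q` (a stop character or the end) and there is room. -/
theorem parsePrimitive_found_default {js : List UInt8} {fuel pos tn n q : Nat} {sup : Int} {ts : Tokens} {r : PrimScan}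
    (hr : primScan .default js fuel pos = some r) (hq : r = .found q ∨ r = .eoi q) (hroom : tn < n) (h31 : tn < 2147483648) :
    parsePrimitive .default js fuel ⟨pos, tn, sup⟩ (some ts) n =
      some (0, ⟨u32 ((q : Int) - 1), tn + 1, sup⟩, some (fillAt ts tn JSMN_PRIMITIVE (i32 pos) (i32 q))) := by
  have ha := allocToken_default (p := ⟨q, tn, sup⟩) (ts := ts) (n := n) hroom h31
  have hpl : Config.default.parentLinks = false := rfl
  have hst : Config.default.strict = false := rfl
  rcases hq with h | h <;> subst h <;> simp only [parsePrimitive, hr, ha, hpl, hst, Bool.false_eq_true, if_false] <;> rfl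

/-- `case '{': case '[':` of the default build when there is room: one more token, open, of the bracket's kind. -/
theorem openBracket_default {ts : Tokens} {n pos tn : Nat} (sup cnt : Int) (k : Kind) (c : UInt8)
    (hc : c = 0x7b ∧ k = .obj ∨ c = 0x5b ∧ k = .arr) (hlen : ts.length = n) (hroom : tn < n)
    (h31 : tn < 2147483647) (hpos : pos < 2147483648) :
    ∃ ts' sup', openBracket .default c n ⟨⟨pos, tn, sup⟩, some ts, cnt⟩ =
        .next ⟨⟨pos, tn + 1, sup'⟩, some ts', i32 (cnt + 1)⟩ ∧
      ts'.length = n ∧ opens ts' (tn + 1) = k.type :: opens ts tn := by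
  have ha := allocToken_default (p := ⟨pos, tn, sup⟩) (ts := ts) hroom (by simp; omega)
  generalize hts1 : ts.set tn { ts.getD tn default with start := -1, «end» := -1, size := 0 } = ts1 at ha
  have hl1 : ts1.length = n := by rw [← hts1]; simpa using hlen
  have hlow : ∀ i, i < tn → ts1.getD i default = ts.getD i default := by
    intro i hi; rw [← hts1, getD_set_ne _ (by omega)]
  have htn : (ts1.getD tn default).«end» = -1 := by rw [← hts1, getD_set_eq _ (by omega)]
  have hip : i32 (pos : Int) = pos := by unfold i32; omega
  have hty : (if c == 0x7b then JSMN_OBJECT else JSMN_ARRAY) = k.type := by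
    rcases hc with ⟨h1, h2⟩ | ⟨h1, h2⟩ <;> subst h1 <;> subst h2 <;> simp [Kind.type]
  -- whatever is done to `size` before, the last write makes token `tn` an open token of kind `k`
  have key : ∀ ts2 : Tokens, ts2.length = n → (∀ j, shape (ts2.getD j default) = shape (ts1.getD j default)) →
      ((ts2.set tn { ts2.getD tn default with type := k.type, start := (pos : Int) }).length = n ∧
       opens (ts2.set tn { ts2.getD tn default with type := k.type, start := (pos : Int) }) (tn + 1) = k.type :: opens ts tn) := by
    intro ts2 hl2 hsh
    refine ⟨by simpa using hl2, ?_⟩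
    have h1 : ∀ i, i < tn → shape ((ts2.set tn { ts2.getD tn default with type := k.type, start := (pos : Int) }).getD i default) =
        shape (ts.getD i default) := by
      intro i hi; rw [getD_set_ne _ (by omega), hsh, hlow i hi]
    have h2 : (ts2.set tn { ts2.getD tn default with type := k.type, start := (pos : Int) }).getD tn default =
        { ts2.getD tn default with type := k.type, start := (pos : Int) } := getD_set_eq _ (by omega)
    have h3 : (ts2.getD tn default).«end» = -1 := by
      have := hsh tn; simp only [shape, Prod.mk.injEq] at this; rw [this.2.2, htn]
    simp only [List.getD_eq_getElem?_getD] at h3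
    rw [opens_add_open h1 (by rw [h2]; simp [Token.isOpen, h3]), h2]
  simp only [openBracket, ha, hty, hip]
  by_cases hs : sup = -1
  · obtain ⟨k1, k2⟩ := key ts1 hl1 (fun j => rfl)
    exact ⟨_, i32 (tn : Int), by simp [hs], k1, k2⟩
  · obtain ⟨k1, k2⟩ := key (tokUpd ts1 sup fun t => { t with size := i32 (t.size + 1) }) (by rw [length_tokUpd, hl1])
      (fun j => shape_tokUpd_size ts1 _ _ j)
    exact ⟨_, i32 (tn : Int), by simp [hs, Config.default], k1, k2⟩


theorem Kind.type_inj {k k' : Kind} : k.type = k'.type ↔ k = k' := by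
  cases k <;> cases k' <;> simp [Kind.type, JSMN_OBJECT, JSMN_ARRAY]

/-- No open token from `j` up to `k`: the open tokens below `k` are those below `j`. -/
theorem opens_skip {ts : Tokens} {j : Nat} : ∀ k, j ≤ k → (∀ i, j ≤ i → i < k → (ts.getD i default).isOpen = false) → opens ts k = opens ts j := by
  intro k
  induction k with
  | zero => intro h _; have : j = 0 := by omega
            subst this; rfl
  | succ k ih =>
    intro hjk h
    by_cases hj : j = k + 1
    · subst hj; rfl
    · rw [opens, if_neg (by rw [h k (by omega) (by omega)]; exact Bool.false_ne_true)]
      exact ih (by omega) (fun i h1 h2 => h i h1 (by omega))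

/-- `case '}': case ']':` of the default build: the innermost open token must be of the bracket's kind `k`; it is then closed. -/
theorem closeScan_default {ts : Tokens} {pos tn : Nat} (sup cnt : Int) (k : Kind) (st : List Kind)
    (hop : opens ts tn = st.map Kind.type) (h31 : tn < 2147483648) (hpos : pos + 1 < 2147483648) :
    match st with
    | [] => closeScan k.type ⟨⟨pos, tn, sup⟩, some ts, cnt⟩ ts = .ret JSMN_ERROR_INVAL ⟨⟨pos, tn, sup⟩, some ts, cnt⟩
    | k' :: st' =>
      if k' = k then ∃ ts' sup', closeScan k.type ⟨⟨pos, tn, sup⟩, some ts, cnt⟩ ts = .next ⟨⟨pos, tn, sup'⟩, some ts', cnt⟩ ∧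
        ts'.length = ts.length ∧ opens ts' tn = st'.map Kind.type
      else closeScan k.type ⟨⟨pos, tn, sup⟩, some ts, cnt⟩ ts = .ret JSMN_ERROR_INVAL ⟨⟨pos, tn, sup⟩, some ts, cnt⟩ := by
  have hi : i32 ((tn : Int) - 1) = (tn : Int) - 1 := by unfold i32; omega
  have hn : ((tn : Int) - 1 + 1).toNat = tn := by omega
  have hlt : ¬ ((tn : Int) - 1 < -1) := by omega
  cases st with
  | nil =>
    have := scanOpen_none_of_opens (by simpa using hop : opens ts tn = [])
    simp [closeScan, hi, hn, hlt, this]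
  | cons k' st' =>
    cases hs : scanOpen ts tn with
    | none => rw [opens_of_scanOpen_none hs] at hop; cases hop
    | some j =>
      obtain ⟨hj1, hj2, hj3⟩ := scanOpen_some hs
      rw [opens_of_scanOpen_some hs] at hop
      simp only [List.map_cons, List.cons.injEq] at hop
      obtain ⟨hty, hrest⟩ := hop
      by_cases hk : k' = k
      · subst hk
        simp only [if_true]
        have hip : i32 ((pos : Int) + 1) = pos + 1 := by unfold i32; omega
        generalize hts' : ts.set j { ts.getD j default with «end» := (pos : Int) + 1 } = ts'
        have hl' : ts'.length = ts.length := by rw [← hts']; simp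
        have hop' : opens ts' tn = st'.map Kind.type := by
          rw [← hrest, opens_skip tn (Nat.le_of_lt hj1)]
          · apply opens_of_shape
            intro i hi; rw [← hts', getD_set_ne _ (by omega)]
          · intro i h1 h2
            by_cases hij : i = j
            · subst hij
              have hjl : i < ts.length := by
                by_cases h : i < ts.length
                · exact h
                · have hd : ts.getD i default = default := by
                    rw [List.getD_eq_getElem?_getD, List.getElem?_eq_none (by omega)]; rfl
                  rw [hd] at hj2; exact absurd hj2 (by decide)
              rw [← hts', getD_set_eq _ hjl]
              simp [Token.isOpen]; omega
            · rw [← hts', getD_set_ne _ (by omega)]; exact hj3 i (by omega) h2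
        have hty' : ((ts.getD j default).type != k'.type) = false := by rw [hty]; simp
        cases hs2 : scanOpen ts' (j + 1) with
        | none => exact ⟨ts', -1, by unfold closeScan; simp only [hi, hn, hlt, hs, hty', hip, hts', hs2, if_false, Bool.false_eq_true], hl', hop'⟩
        | some m => exact ⟨ts', m, by unfold closeScan; simp only [hi, hn, hlt, hs, hty', hip, hts', hs2, if_false, Bool.false_eq_true], hl', hop'⟩
      · have : ¬ k'.type = k.type := fun h => hk (Kind.type_inj.mp h)
        have hne : ((k'.type != k.type) = true) := by simpa using this
        unfold closeScan; simp only [hi, hn, hlt, hs, hty, hk, hne, if_false, if_true]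

/-- `case ',':` of the default build only moves `toksuper`. -/
theorem comma_default (pos tn : Nat) (sup cnt : Int) (ts : Tokens) :
    ∃ sup', comma .default ⟨⟨pos, tn, sup⟩, some ts, cnt⟩ = .next ⟨⟨pos, tn, sup'⟩, some ts, cnt⟩ := by
  simp only [comma, Config.default]
  split
  · simp only [Bool.false_eq_true, if_false]
    split
    · exact ⟨_, rfl⟩
    · split
      · exact ⟨_, rfl⟩
      · exact ⟨_, rfl⟩
  · exact ⟨_, rfl⟩

/-- The check after the main loop: -3 if a container is open. -/
theorem finish_default {ts : Tokens} {pos tn : Nat} (sup cnt : Int) (st : List Kind)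
    (hop : opens ts tn = st.map Kind.type) (h31 : tn < 2147483648) :
    finish ⟨⟨pos, tn, sup⟩, some ts, cnt⟩ = if st = [] then cnt else JSMN_ERROR_PART := by
  have hi : i32 ((tn : Int) - 1) = (tn : Int) - 1 := by unfold i32; omega
  simp only [finish, hi]
  by_cases h0 : tn = 0
  · subst h0
    cases st with
    | nil => simp
    | cons k st => simp [opens] at hop
  · have hn : ((tn : Int) - 1 + 1).toNat = tn := by omega
    rw [if_neg (by omega), hn]
    cases st with
    | nil => simp [scanOpen_none_of_opens (by simpa using hop : opens ts tn = [])]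
    | cons k st =>
      cases hs : scanOpen ts tn with
      | none => rw [opens_of_scanOpen_none hs] at hop; cases hop
      | some j => simp


/-! ### `resultFrom`, item by item -/

def Kind.openItem : Kind → Item
  | .obj => .objOpen
  | .arr => .arrOpen
def Kind.closeItem : Kind → Item
  | .obj => .objClose
  | .arr => .arrClose

theorem tokCount_push (i : Item) (r : List Item × Ending) : tokCount (push i r).1 = tokCount r.1 + if i.isToken then 1 else 0 := by
  simp only [push, tokCount, List.filter_cons]; split <;> simp
/-- There is room in an array of `n` tokens, `tn` of them used, for the tokens among `items`. (A definition, so that `omega` does not look inside.) -/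
def Room (tn : Nat) (items : List Item) (n : Nat) : Prop := tn + tokCount items ≤ n
theorem Room.tok {tn n : Nat} {i : Item} {r : List Item × Ending} (hi : i.isToken = true) (h : Room tn (push i r).1 n) :
    tn < n ∧ Room (tn + 1) r.1 n := by
  simp only [Room, tokCount_push, hi, if_true] at *; omega
theorem Room.non {tn n : Nat} {i : Item} {r : List Item × Ending} (hi : i.isToken = false) (h : Room tn (push i r).1 n) :
    Room tn r.1 n := by
  simp only [Room, tokCount_push, hi] at *; simpa using h
theorem tokCount_push_tok (i : Item) (r : List Item × Ending) (h : i.isToken = true) : tokCount (push i r).1 = tokCount r.1 + 1 := by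
  rw [tokCount_push, if_pos h]
theorem tokCount_push_non (i : Item) (r : List Item × Ending) (h : i.isToken = false) : tokCount (push i r).1 = tokCount r.1 := by
  rw [tokCount_push, if_neg (by rw [h]; exact Bool.false_ne_true)]; rfl

theorem resultFrom_open (st : List Kind) (cnt : Int) (k : Kind) (r : List Item × Ending) :
    resultFrom st cnt (push k.openItem r) = resultFrom (k :: st) (cnt + 1) r := by
  cases k <;> simp only [resultFrom, push, brackets, Kind.openItem, tokCount, List.filter_cons, Item.isToken] <;>
    (cases brackets _ r.1 <;> simp only [] ; cases r.2 <;> simp only [if_true, List.length_cons] <;> split <;> simp <;> omega)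

theorem resultFrom_close (st : List Kind) (cnt : Int) (k : Kind) (r : List Item × Ending) :
    resultFrom st cnt (push k.closeItem r) =
      match st with
      | [] => JSMN_ERROR_INVAL
      | k' :: st' => if k' = k then resultFrom st' cnt r else JSMN_ERROR_INVAL := by
  cases st with
  | nil => cases k <;> simp [resultFrom, push, brackets, Kind.closeItem]
  | cons k' st' =>
    cases k <;> cases k' <;> simp [resultFrom, push, brackets, Kind.closeItem, tokCount, List.filter_cons, Item.isToken]

theorem resultFrom_other (st : List Kind) (cnt : Int) (i : Item) (hi : i = .colon ∨ i = .comma) (r : List Item × Ending) :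
    resultFrom st cnt (push i r) = resultFrom st cnt r := by
  rcases hi with h | h <;> subst h <;> simp [resultFrom, push, brackets, tokCount, List.filter_cons, Item.isToken]

theorem resultFrom_tok (st : List Kind) (cnt : Int) (i : Item) (hi : i = .str ∨ i = .prim) (r : List Item × Ending) :
    resultFrom st cnt (push i r) = resultFrom st (cnt + 1) r := by
  rcases hi with h | h <;> subst h <;> simp only [resultFrom, push, brackets, tokCount, List.filter_cons, Item.isToken] <;>
    (cases brackets _ r.1 <;> simp only [] ; cases r.2 <;> simp only [if_true, List.length_cons] <;> split <;> simp <;> omega)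

end Jsmn.AcceptLang
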